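-- pv_equiv track=rewrite | github.com/fjtluz/pygame-connect_four | main.py | calcula_jogada_de_maior_valor
-- ===== SOURCE A (Python) =====
-- def calcula_jogada_de_maior_valor(matriz_valores_vermelho, matriz_valores_amarelo, colunas_bloqueadas) -> tuple[int, int, bool]:
--     """
--         Retorna uma tupla contendo, o valor da maior jogada, a coluna que deve jogada e se a jogada favorece o vermelho
--     """
--
--     maior_valor = (0, 0, False)
--     jogadas_com_maior_valor = []
--
--     for idx_lin in range(len(matriz_valores_vermelho)):
--         linha_vermelho = matriz_valores_vermelho[idx_lin]
--         linha_amarelo = matriz_valores_amarelo[idx_lin]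
--         for idx_col in range(len(linha_amarelo)):
--             valor_vermelho = linha_vermelho[idx_col]
--             valor_amarelo = linha_amarelo[idx_col]
--             maximo_linha = valor_vermelho + valor_amarelo
--             if colunas_bloqueadas.count(idx_col) == 0:
--                 if maximo_linha > maior_valor[0]:
--                     maior_valor = (maximo_linha, idx_col, valor_vermelho > valor_amarelo)
--                     jogadas_com_maior_valor = [maior_valor]
--                 elif maximo_linha == maior_valor[0]:
--                     jogadas_com_maior_valor.append((maximo_linha, idx_col, valor_vermelho > valor_amarelo))
--
--     for possivel_jogada in jogadas_com_maior_valor: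
--         maior_valor = possivel_jogada
--         if possivel_jogada[2]:
--             break
--
--     return maior_valor
-- ===== SOURCE B (Python) =====
-- def calcula_jogada_de_maior_valor(matriz_valores_vermelho, matriz_valores_amarelo, colunas_bloqueadas) -> tuple[int, int, bool]:
--     """
--         Retorna uma tupla contendo, o valor da maior jogada, a coluna que deve jogada e se a jogada favorece o vermelho
--     """
--     # Pass 1: collect every non-blocked cell in row-major order.
--     moves = []
--     for idx_lin in range(len(matriz_valores_vermelho)):
--         linha_vermelho = matriz_valores_vermelho[idx_lin]
--         linha_amarelo = matriz_valores_amarelo[idx_lin]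
--         for idx_col in range(len(linha_amarelo)):
--             vv = linha_vermelho[idx_col]
--             va = linha_amarelo[idx_col]
--             if colunas_bloqueadas.count(idx_col) == 0:
--                 moves.append((vv + va, idx_col, vv > va))
--     # Pass 2: the best value (clamped at 0), then the best moves.
--     maior = max([0] + [t[0] for t in moves])
--     top = [t for t in moves if t[0] == maior]
--     if not top:
--         return (0, 0, False)
--     # Pass 3: first move favouring red, else the last best move.
--     for t in top:
--         if t[2]:
--             return t
--     return top[-1]
-- ===== Notes on version B (the rewrite author's own statement) =====
-- stated objective: alternative
-- what changed: Replaces A's inline max-tracking with candidate-list resets/appends and a break-on-red final loop by separate passes: collect all unblocked cells, compute the clamped maximum, filter the top moves, then pick the first red-favouring one else the last.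
import Mathlib
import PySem

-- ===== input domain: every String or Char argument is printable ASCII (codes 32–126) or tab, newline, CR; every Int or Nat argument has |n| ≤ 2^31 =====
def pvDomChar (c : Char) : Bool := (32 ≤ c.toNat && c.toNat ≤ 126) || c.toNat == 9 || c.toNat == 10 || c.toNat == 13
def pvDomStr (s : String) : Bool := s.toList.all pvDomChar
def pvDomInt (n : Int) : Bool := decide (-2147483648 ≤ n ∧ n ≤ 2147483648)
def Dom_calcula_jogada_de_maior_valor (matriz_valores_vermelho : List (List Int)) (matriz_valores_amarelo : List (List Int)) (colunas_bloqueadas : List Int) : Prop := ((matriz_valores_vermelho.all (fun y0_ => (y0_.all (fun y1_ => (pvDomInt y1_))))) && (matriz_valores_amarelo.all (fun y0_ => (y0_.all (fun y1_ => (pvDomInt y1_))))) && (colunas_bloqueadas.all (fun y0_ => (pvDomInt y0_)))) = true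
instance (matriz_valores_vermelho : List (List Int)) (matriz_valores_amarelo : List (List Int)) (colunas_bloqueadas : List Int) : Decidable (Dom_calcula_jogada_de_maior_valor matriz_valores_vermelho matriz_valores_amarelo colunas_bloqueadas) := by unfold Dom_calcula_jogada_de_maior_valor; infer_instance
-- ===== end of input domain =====

-- B replaces A's inline max-tracking/reset loop by separate collect / max / filter / select passes
-- (same cost, different decomposition); equivalence is about the return value, neither mutates its arguments.

-- ===== PORT A =====
-- one inner-loop iteration of A: read both cells, then the blocked / greater / equal branch chain
def pvCellA (colunas_bloqueadas : List Int)
    (st : (Int × Int × Bool) × List (Int × Int × Bool))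
    (linha_vermelho linha_amarelo : List Int) (idx_col : Int) :
    (Int × Int × Bool) × List (Int × Int × Bool) :=
  let valor_vermelho := PySem.List.pyGetD linha_vermelho idx_col 0
  let valor_amarelo := PySem.List.pyGetD linha_amarelo idx_col 0
  let maximo_linha := valor_vermelho + valor_amarelo
  if PySem.List.count colunas_bloqueadas idx_col = 0 then
    if maximo_linha > st.1.1 then
      ((maximo_linha, idx_col, decide (valor_vermelho > valor_amarelo)),
       [(maximo_linha, idx_col, decide (valor_vermelho > valor_amarelo))])
    else if maximo_linha = st.1.1 then
      (st.1, st.2 ++ [(maximo_linha, idx_col, decide (valor_vermelho > valor_amarelo))])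
    else st
  else st

-- A's inner loop: for idx_col in range(len(linha_amarelo))
def pvRowA (colunas_bloqueadas : List Int)
    (st : (Int × Int × Bool) × List (Int × Int × Bool))
    (linha_vermelho linha_amarelo : List Int) :
    (Int × Int × Bool) × List (Int × Int × Bool) :=
  (PySem.List.pyRange 0 (PySem.List.len linha_amarelo) 1).foldl
    (fun st idx_col => pvCellA colunas_bloqueadas st linha_vermelho linha_amarelo idx_col) st

-- A's outer loop: for idx_lin in range(len(matriz_valores_vermelho)), from the initial state
def pvLoopA (matriz_valores_vermelho matriz_valores_amarelo : List (List Int))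
    (colunas_bloqueadas : List Int) : (Int × Int × Bool) × List (Int × Int × Bool) :=
  (PySem.List.pyRange 0 (PySem.List.len matriz_valores_vermelho) 1).foldl
    (fun st idx_lin =>
      pvRowA colunas_bloqueadas st
        (PySem.List.pyGetD matriz_valores_vermelho idx_lin [])
        (PySem.List.pyGetD matriz_valores_amarelo idx_lin []))
    (((0 : Int), (0 : Int), false), [])

-- A's final loop: maior_valor = possivel_jogada; break on possivel_jogada[2]
def pvFinalA (maior_valor : Int × Int × Bool) : List (Int × Int × Bool) → Int × Int × Bool
  | [] => maior_valor
  | pj :: rest => if pj.2.2 then pj else pvFinalA pj rest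

def calcula_jogada_de_maior_valor (matriz_valores_vermelho : List (List Int)) (matriz_valores_amarelo : List (List Int)) (colunas_bloqueadas : List Int) : Int × Int × Bool :=
  let st := pvLoopA matriz_valores_vermelho matriz_valores_amarelo colunas_bloqueadas
  pvFinalA st.1 st.2

-- ===== PORT B =====
-- one inner-loop iteration of B: read both cells, append the move when the column is not blocked
def pvCellB (colunas_bloqueadas : List Int) (linha_vermelho linha_amarelo : List Int)
    (moves : List (Int × Int × Bool)) (idx_col : Int) : List (Int × Int × Bool) :=
  let vv := PySem.List.pyGetD linha_vermelho idx_col 0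
  let va := PySem.List.pyGetD linha_amarelo idx_col 0
  if PySem.List.count colunas_bloqueadas idx_col = 0 then
    moves ++ [(vv + va, idx_col, decide (vv > va))]
  else moves

-- B's inner loop: for idx_col in range(len(linha_amarelo))
def pvRowB (colunas_bloqueadas : List Int) (linha_vermelho linha_amarelo : List Int)
    (moves : List (Int × Int × Bool)) : List (Int × Int × Bool) :=
  (PySem.List.pyRange 0 (PySem.List.len linha_amarelo) 1).foldl
    (pvCellB colunas_bloqueadas linha_vermelho linha_amarelo) moves

-- B's pass 1: collect every non-blocked cell in row-major order
def pvMovesB (matriz_valores_vermelho matriz_valores_amarelo : List (List Int))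
    (colunas_bloqueadas : List Int) : List (Int × Int × Bool) :=
  (PySem.List.pyRange 0 (PySem.List.len matriz_valores_vermelho) 1).foldl
    (fun moves idx_lin =>
      pvRowB colunas_bloqueadas
        (PySem.List.pyGetD matriz_valores_vermelho idx_lin [])
        (PySem.List.pyGetD matriz_valores_amarelo idx_lin []) moves)
    []

def calcula_jogada_de_maior_valor_alt (matriz_valores_vermelho : List (List Int)) (matriz_valores_amarelo : List (List Int)) (colunas_bloqueadas : List Int) : Int × Int × Bool :=
  let moves := pvMovesB matriz_valores_vermelho matriz_valores_amarelo colunas_bloqueadas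
  -- maior = max([0] + [t[0] for t in moves])
  let maior := (moves.map (fun t => t.1)).foldl max 0
  let top := moves.filter (fun t => t.1 == maior)
  if top = [] then (0, 0, false)
  else
    match top.find? (fun t => t.2.2) with
    | some t => t
    | none => PySem.List.pyGetD top (-1) (0, 0, false)   -- top[-1]

-- ===== PRECONDITION & SPEC =====
-- Pre_ excludes exactly the shapes on which both Pythons raise IndexError: a yellow matrix with
-- fewer rows than the red one, or a red row shorter than its paired yellow row.
def Pre_calcula_jogada_de_maior_valor (matriz_valores_vermelho : List (List Int)) (matriz_valores_amarelo : List (List Int)) (colunas_bloqueadas : List Int) : Prop :=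
  matriz_valores_vermelho.length ≤ matriz_valores_amarelo.length ∧
  ∀ p ∈ matriz_valores_vermelho.zip matriz_valores_amarelo, p.2.length ≤ p.1.length
instance (matriz_valores_vermelho : List (List Int)) (matriz_valores_amarelo : List (List Int)) (colunas_bloqueadas : List Int) : Decidable (Pre_calcula_jogada_de_maior_valor matriz_valores_vermelho matriz_valores_amarelo colunas_bloqueadas) := by unfold Pre_calcula_jogada_de_maior_valor; infer_instance

def pvWitness_calcula_jogada_de_maior_valor : List (List Int) × List (List Int) × List Int :=
  ([[1, -2], [0, 3]], [[2, 2], [1, 1]], [0])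

def Spec_calcula_jogada_de_maior_valor (matriz_valores_vermelho : List (List Int)) (matriz_valores_amarelo : List (List Int)) (colunas_bloqueadas : List Int) (out : Int × Int × Bool) : Prop := out = calcula_jogada_de_maior_valor_alt matriz_valores_vermelho matriz_valores_amarelo colunas_bloqueadas
instance (matriz_valores_vermelho : List (List Int)) (matriz_valores_amarelo : List (List Int)) (colunas_bloqueadas : List Int) (out : Int × Int × Bool) : Decidable (Spec_calcula_jogada_de_maior_valor matriz_valores_vermelho matriz_valores_amarelo colunas_bloqueadas out) := by unfold Spec_calcula_jogada_de_maior_valor; infer_instance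

-- ===== CLAIM (what is proved, stated in full; the proofs are below) =====
def Claim_equal_calcula_jogada_de_maior_valor : Prop := ∀ (matriz_valores_vermelho : List (List Int)) (matriz_valores_amarelo : List (List Int)) (colunas_bloqueadas : List Int), Dom_calcula_jogada_de_maior_valor matriz_valores_vermelho matriz_valores_amarelo colunas_bloqueadas → Pre_calcula_jogada_de_maior_valor matriz_valores_vermelho matriz_valores_amarelo colunas_bloqueadas → Spec_calcula_jogada_de_maior_valor matriz_valores_vermelho matriz_valores_amarelo colunas_bloqueadas (calcula_jogada_de_maior_valor matriz_valores_vermelho matriz_valores_amarelo colunas_bloqueadas)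

-- ===== LEMMAS AND PROOFS =====

-- The invariant tying A's running state (maior_valor, jogadas_com_maior_valor) to B's move list:
-- maior_valor[0] is the clamped maximum of the collected sums, the candidate list is exactly the
-- top filter of the collected moves, and an empty candidate list means maior_valor is untouched.
def pvInv (ms : List (Int × Int × Bool)) (st : (Int × Int × Bool) × List (Int × Int × Bool)) : Prop :=
  st.1.1 = (ms.map (fun t => t.1)).foldl max 0 ∧
  st.2 = ms.filter (fun t => t.1 == st.1.1) ∧
  (st.2 = [] → st.1 = (0, 0, false)) ∧
  ∀ t ∈ ms, t.1 ≤ st.1.1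

theorem pvInv_init : pvInv [] (((0 : Int), (0 : Int), false), []) :=
  ⟨rfl, rfl, fun _ => rfl, by simp⟩

theorem pvInv_cell (colunas_bloqueadas linha_vermelho linha_amarelo : List Int) (idx_col : Int)
    (ms : List (Int × Int × Bool)) (st : (Int × Int × Bool) × List (Int × Int × Bool))
    (h : pvInv ms st) :
    pvInv (pvCellB colunas_bloqueadas linha_vermelho linha_amarelo ms idx_col)
      (pvCellA colunas_bloqueadas st linha_vermelho linha_amarelo idx_col) := by
  obtain ⟨h1, h2, h3, h4⟩ := h
  by_cases hc : PySem.List.count colunas_bloqueadas idx_col = 0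
  · have hB : pvCellB colunas_bloqueadas linha_vermelho linha_amarelo ms idx_col =
        ms ++ [(PySem.List.pyGetD linha_vermelho idx_col 0 + PySem.List.pyGetD linha_amarelo idx_col 0,
                idx_col,
                decide (PySem.List.pyGetD linha_vermelho idx_col 0 > PySem.List.pyGetD linha_amarelo idx_col 0))] := by
      simp only [pvCellB]; rw [if_pos hc]
    set vv := PySem.List.pyGetD linha_vermelho idx_col 0 with hvv
    set va := PySem.List.pyGetD linha_amarelo idx_col 0 with hva
    set c : Int × Int × Bool := (vv + va, idx_col, decide (vv > va)) with hcdef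
    have hc1 : c.1 = vv + va := rfl
    by_cases hgt : st.1.1 < vv + va
    · have hA : pvCellA colunas_bloqueadas st linha_vermelho linha_amarelo idx_col = (c, [c]) := by
        simp only [pvCellA]; rw [if_pos hc, if_pos hgt]
      rw [hA, hB]
      refine ⟨?_, ?_, by simp, ?_⟩
      · show vv + va = _
        simp only [List.map_append, List.foldl_append, List.map_cons, List.map_nil,
          List.foldl_cons, List.foldl_nil, ← h1]
        omega
      · show ([c] : List (Int × Int × Bool)) = List.filter (fun t => t.1 == c.1) (ms ++ [c])
        have hnil : ms.filter (fun t => t.1 == c.1) = [] := by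
          refine List.filter_eq_nil_iff.mpr ?_
          intro t ht
          have := h4 t ht
          simp only [beq_iff_eq]
          omega
        rw [List.filter_append, hnil]
        simp
      · intro t ht
        rcases List.mem_append.mp ht with h' | h'
        · exact le_of_lt (lt_of_le_of_lt (h4 t h') hgt)
        · simp only [List.mem_singleton] at h'; subst h'; exact le_refl _
    · by_cases heq : vv + va = st.1.1
      · have hA : pvCellA colunas_bloqueadas st linha_vermelho linha_amarelo idx_col =
            (st.1, st.2 ++ [c]) := by
          simp only [pvCellA]; rw [if_pos hc, if_neg hgt, if_pos heq]
        rw [hA, hB]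
        refine ⟨?_, ?_, by simp, ?_⟩
        · show st.1.1 = _
          simp only [List.map_append, List.foldl_append, List.map_cons, List.map_nil,
            List.foldl_cons, List.foldl_nil, ← h1]
          omega
        · show st.2 ++ [c] = List.filter (fun t => t.1 == st.1.1) (ms ++ [c])
          rw [List.filter_append, ← h2]
          have : (c.1 == st.1.1) = true := by simp only [beq_iff_eq]; omega
          simp [List.filter, this]
        · intro t ht
          rcases List.mem_append.mp ht with h' | h'
          · exact h4 t h'
          · simp only [List.mem_singleton] at h'; subst h'; show c.1 ≤ st.1.1; omega
      · have hA : pvCellA colunas_bloqueadas st linha_vermelho linha_amarelo idx_col = st := by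
          simp only [pvCellA]; rw [if_pos hc, if_neg hgt, if_neg heq]
        rw [hA, hB]
        refine ⟨?_, ?_, h3, ?_⟩
        · show st.1.1 = _
          simp only [List.map_append, List.foldl_append, List.map_cons, List.map_nil,
            List.foldl_cons, List.foldl_nil, ← h1]
          omega
        · show st.2 = List.filter (fun t => t.1 == st.1.1) (ms ++ [c])
          rw [List.filter_append, ← h2]
          have : (c.1 == st.1.1) = false := by simp only [beq_eq_false_iff_ne, ne_eq]; omega
          simp [List.filter, this]
        · intro t ht
          rcases List.mem_append.mp ht with h' | h'
          · exact h4 t h'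
          · simp only [List.mem_singleton] at h'; subst h'; show c.1 ≤ st.1.1; omega
  · have hA : pvCellA colunas_bloqueadas st linha_vermelho linha_amarelo idx_col = st := by
      simp only [pvCellA]; rw [if_neg hc]
    have hB : pvCellB colunas_bloqueadas linha_vermelho linha_amarelo ms idx_col = ms := by
      simp only [pvCellB]; rw [if_neg hc]
    rw [hA, hB]
    exact ⟨h1, h2, h3, h4⟩

theorem pvInv_rowfold (colunas_bloqueadas linha_vermelho linha_amarelo : List Int) (n : Nat) :
    ∀ ms st, pvInv ms st →
      pvInv ((PySem.List.pyRange 0 (n : Int) 1).foldl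
               (pvCellB colunas_bloqueadas linha_vermelho linha_amarelo) ms)
            ((PySem.List.pyRange 0 (n : Int) 1).foldl
               (fun st idx_col => pvCellA colunas_bloqueadas st linha_vermelho linha_amarelo idx_col) st) := by
  induction n with
  | zero =>
    intro ms st h
    simpa [PySem.List.pyRange_one_eq_nil (le_refl (0 : Int))] using h
  | succ n ih =>
    intro ms st h
    have hcast : ((n + 1 : Nat) : Int) = (n : Int) + 1 := by push_cast; ring
    rw [hcast, PySem.List.pyRange_one_succ_right (by positivity), List.foldl_append,
      List.foldl_append]
    exact pvInv_cell _ _ _ _ _ _ (ih ms st h)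

theorem pvInv_row (colunas_bloqueadas linha_vermelho linha_amarelo : List Int)
    (ms : List (Int × Int × Bool)) (st : (Int × Int × Bool) × List (Int × Int × Bool))
    (h : pvInv ms st) :
    pvInv (pvRowB colunas_bloqueadas linha_vermelho linha_amarelo ms)
      (pvRowA colunas_bloqueadas st linha_vermelho linha_amarelo) := by
  unfold pvRowA pvRowB
  rw [PySem.List.len_eq]
  exact pvInv_rowfold colunas_bloqueadas linha_vermelho linha_amarelo linha_amarelo.length ms st h

theorem pvInv_outerfold (matriz_valores_vermelho matriz_valores_amarelo : List (List Int))
    (colunas_bloqueadas : List Int) (n : Nat) :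
    pvInv ((PySem.List.pyRange 0 (n : Int) 1).foldl
             (fun moves idx_lin =>
               pvRowB colunas_bloqueadas
                 (PySem.List.pyGetD matriz_valores_vermelho idx_lin [])
                 (PySem.List.pyGetD matriz_valores_amarelo idx_lin []) moves) [])
          ((PySem.List.pyRange 0 (n : Int) 1).foldl
             (fun st idx_lin =>
               pvRowA colunas_bloqueadas st
                 (PySem.List.pyGetD matriz_valores_vermelho idx_lin [])
                 (PySem.List.pyGetD matriz_valores_amarelo idx_lin []))
             (((0 : Int), (0 : Int), false), [])) := by
  induction n with
  | zero =>
    simpa [PySem.List.pyRange_one_eq_nil (le_refl (0 : Int))] using pvInv_init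
  | succ n ih =>
    have hcast : ((n + 1 : Nat) : Int) = (n : Int) + 1 := by push_cast; ring
    rw [hcast, PySem.List.pyRange_one_succ_right (by positivity), List.foldl_append,
      List.foldl_append]
    exact pvInv_row _ _ _ _ _ ih

theorem pvInv_loop (matriz_valores_vermelho matriz_valores_amarelo : List (List Int))
    (colunas_bloqueadas : List Int) :
    pvInv (pvMovesB matriz_valores_vermelho matriz_valores_amarelo colunas_bloqueadas)
      (pvLoopA matriz_valores_vermelho matriz_valores_amarelo colunas_bloqueadas) := by
  unfold pvLoopA pvMovesB
  rw [PySem.List.len_eq]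
  exact pvInv_outerfold matriz_valores_vermelho matriz_valores_amarelo colunas_bloqueadas
    matriz_valores_vermelho.length

-- A's break-loop over a nonempty candidate list is "first red-favouring move, else the last one".
theorem pvFinalA_eq (l : List (Int × Int × Bool)) (hl : l ≠ []) (mv : Int × Int × Bool) :
    pvFinalA mv l =
      (match l.find? (fun t => t.2.2) with
       | some t => t
       | none => PySem.List.pyGetD l (-1) (0, 0, false)) := by
  induction l generalizing mv with
  | nil => exact absurd rfl hl
  | cons pj rest ih =>
    by_cases hb : pj.2.2
    · simp [pvFinalA, hb, List.find?]
    · rcases eq_or_ne rest [] with hr | hr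
      · subst hr
        simp [pvFinalA, hb, List.find?,
          PySem.List.pyGetD_neg_one (xs := [pj]) (d := (0, 0, false)) (h := by simp)]
      · have hstep : pvFinalA mv (pj :: rest) = pvFinalA pj rest := by
          simp [pvFinalA, hb]
        rw [hstep, ih hr pj]
        have hfind : (pj :: rest).find? (fun t => t.2.2) = rest.find? (fun t => t.2.2) := by
          simp [List.find?, hb]
        rw [hfind]
        cases hf : rest.find? (fun t => t.2.2) with
        | some t => rfl
        | none =>
          simp only []
          rw [PySem.List.pyGetD_neg_one (xs := rest) (d := (0, 0, false)) (h := hr),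
            PySem.List.pyGetD_neg_one (xs := pj :: rest) (d := (0, 0, false)) (h := by simp),
            List.getLast_cons hr]

-- ===== VERDICT (by name: the statement is the Claim_ definition above) =====
theorem calcula_jogada_de_maior_valor_spec : Claim_equal_calcula_jogada_de_maior_valor := by
  intro matriz_valores_vermelho matriz_valores_amarelo colunas_bloqueadas _ _
  unfold Spec_calcula_jogada_de_maior_valor
  obtain ⟨h1, h2, h3, _⟩ :=
    pvInv_loop matriz_valores_vermelho matriz_valores_amarelo colunas_bloqueadas
  simp only [calcula_jogada_de_maior_valor, calcula_jogada_de_maior_valor_alt]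
  rw [← h1, ← h2]
  rcases eq_or_ne (pvLoopA matriz_valores_vermelho matriz_valores_amarelo colunas_bloqueadas).2 []
    with he | he
  · rw [he, if_pos rfl, ← h3 he]
    rfl
  · rw [if_neg he]
    exact pvFinalA_eq _ he _
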